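-- pv_equiv track=rewrite | github.com/linhdvu14/cp-sols | sols/Meta/HackerCup/2022/2022_2/A1_Perfectly_Balanced_Chapter_1.py | solve
-- ===== SOURCE A (Python) =====
-- def solve(S, Q, queries):
--     pref = [[0] * 26]
--     for c in S:
--         cnt = pref[-1][:]
--         cnt[ord(c) - ord('a')] += 1
--         pref.append(cnt)
--
--     def is_ok(l, r):
--         if (r - l + 1) % 2 == 0: return False
--         l -= 1; r -= 1
--         m = (l + r) // 2
--         cl = cr = 0
--         for c in range(26):
--             if pref[m + 1][c] - pref[l][c] != pref[r + 1][c] - pref[m + 1][c]: cl += 1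
--             if pref[m][c] - pref[l][c] != pref[r + 1][c] - pref[m][c]: cr += 1
--         return cl == 1 or cr == 1
--
--     res = 0
--     for l, r in queries:
--         if is_ok(l, r):
--             res += 1
--
--     return res
-- ===== SOURCE B (Python) =====
-- def solve(S, Q, queries):
--     def freq(a, b):
--         f = [0] * 26
--         for i in range(a, b):
--             f[ord(S[i]) - ord('a')] += 1
--         return f
--
--     res = 0
--     for l, r in queries:
--         if (r - l + 1) % 2 == 0:
--             continue
--         l0, r0 = l - 1, r - 1
--         m = (l0 + r0) // 2
--         cl = sum(x != y for x, y in zip(freq(l0, m + 1), freq(m + 1, r0 + 1)))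
--         cr = sum(x != y for x, y in zip(freq(l0, m), freq(m, r0 + 1)))
--         if cl == 1 or cr == 1:
--             res += 1
--     return res
-- ===== Notes on version B (the rewrite author's own statement) =====
-- stated objective: simpler
-- what changed: B drops A's precomputed prefix-count table entirely and answers each query by directly building frequency arrays of the two halves of the substring and comparing them with a zip/sum, trading A's O((n+Q)*26) index for an O(Q*n) rescan with plainer per-query logic.
-- outside the precondition, e.g. on solve('ab', 1, [(3, 1)]): A returns 1, B returns 0; on solve('a', 1, [(-1, 1)]): A returns 1, B raises IndexError
import Mathlib
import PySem

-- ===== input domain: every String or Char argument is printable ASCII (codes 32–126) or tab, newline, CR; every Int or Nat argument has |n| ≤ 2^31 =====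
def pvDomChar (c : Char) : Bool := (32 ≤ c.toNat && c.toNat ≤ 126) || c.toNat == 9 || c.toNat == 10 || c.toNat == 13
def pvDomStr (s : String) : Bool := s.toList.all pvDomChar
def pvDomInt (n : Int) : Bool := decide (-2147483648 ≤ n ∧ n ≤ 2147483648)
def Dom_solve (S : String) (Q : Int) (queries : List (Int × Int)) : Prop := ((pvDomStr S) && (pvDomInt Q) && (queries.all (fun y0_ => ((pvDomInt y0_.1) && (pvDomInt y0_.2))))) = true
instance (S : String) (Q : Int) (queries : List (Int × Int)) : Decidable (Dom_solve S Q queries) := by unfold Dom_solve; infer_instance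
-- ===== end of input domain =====

-- B removes A's prefix-count table and answers each query by rescanning the substring directly (same return value; objective: simpler per-query logic, alternative algorithm, O(Q·n·26) instead of O((n+Q)·26)).

-- ===== PORT A =====
-- cnt[ord(c) - ord('a')] += 1 : Python get-then-set; PySem.List.pyGetD/pySetD reproduce Python's negative-index wraparound exactly (out-of-range raises are excluded by Pre_)
def pvIncrA (xs : List Int) (i : Int) : List Int :=
  PySem.List.pySetD xs i (PySem.List.pyGetD xs i 0 + 1)

def pvIsOkA (pref : List (List Int)) (l r : Int) : Bool :=
  if PySem.Int.mod (r - l + 1) 2 == 0 then false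
  else
    let l := l - 1
    let r := r - 1
    let m := PySem.Int.floordiv (l + r) 2
    let p := (PySem.List.pyRange 0 26 1).foldl (fun (p : Int × Int) c =>
      ((if PySem.List.pyGetD (PySem.List.pyGetD pref (m + 1) []) c 0 - PySem.List.pyGetD (PySem.List.pyGetD pref l []) c 0 ≠ PySem.List.pyGetD (PySem.List.pyGetD pref (r + 1) []) c 0 - PySem.List.pyGetD (PySem.List.pyGetD pref (m + 1) []) c 0 then p.1 + 1 else p.1),
       (if PySem.List.pyGetD (PySem.List.pyGetD pref m []) c 0 - PySem.List.pyGetD (PySem.List.pyGetD pref l []) c 0 ≠ PySem.List.pyGetD (PySem.List.pyGetD pref (r + 1) []) c 0 - PySem.List.pyGetD (PySem.List.pyGetD pref m []) c 0 then p.2 + 1 else p.2))) (0, 0)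
    p.1 == 1 || p.2 == 1

def solve (S : String) (Q : Int) (queries : List (Int × Int)) : Int :=
  let pref := S.toList.foldl (fun pref c =>
    pref ++ [pvIncrA (PySem.List.pyGetD pref (-1) []) ((c.toNat : Int) - 97)])
    [List.replicate 26 (0 : Int)]
  queries.foldl (fun res q => if pvIsOkA pref q.1 q.2 then res + 1 else res) 0

-- ===== PORT B =====
-- f[ord(S[i]) - ord('a')] += 1 : Python get-then-set, inlined as in Source B (negative index wraps, as in Python)
def pvFreq (cs : List Char) (a b : Int) : List Int :=
  (PySem.List.pyRange a b 1).foldl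
    (fun f i =>
      PySem.List.pySetD f (((PySem.List.pyGetD cs i ' ').toNat : Int) - 97)
        (PySem.List.pyGetD f (((PySem.List.pyGetD cs i ' ').toNat : Int) - 97) 0 + 1))
    (List.replicate 26 (0 : Int))

-- sum(x != y for x, y in zip(xs, ys))
def pvDiffCount (xs ys : List Int) : Int :=
  ((xs.zip ys).map (fun p => if p.1 ≠ p.2 then (1 : Int) else 0)).sum

def solve_alt (S : String) (Q : Int) (queries : List (Int × Int)) : Int :=
  queries.foldl (fun res q =>
    if PySem.Int.mod (q.2 - q.1 + 1) 2 == 0 then res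
    else
      let l0 := q.1 - 1
      let r0 := q.2 - 1
      let m := PySem.Int.floordiv (l0 + r0) 2
      let cl := pvDiffCount (pvFreq S.toList l0 (m + 1)) (pvFreq S.toList (m + 1) (r0 + 1))
      let cr := pvDiffCount (pvFreq S.toList l0 m) (pvFreq S.toList m (r0 + 1))
      if cl == 1 || cr == 1 then res + 1 else res) 0

-- ===== PRECONDITION & SPEC =====
-- Pre_ restricts S to characters 'G'..'z' (others make A's 26-slot counter raise IndexError while building the
-- prefix table) and each query to even length or 1 ≤ l ≤ r ≤ len(S): on out-of-range or inverted odd-length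
-- queries A's prefix-table lookups either raise IndexError or wrap negative indices, an accidental value of the
-- table representation that B's direct rescan has no reason to reproduce.
def Pre_solve (S : String) (Q : Int) (queries : List (Int × Int)) : Prop :=
  (S.toList.all (fun c => 71 ≤ c.toNat && c.toNat ≤ 122) = true) ∧
  ∀ q ∈ queries, PySem.Int.mod (q.2 - q.1 + 1) 2 = 0 ∨ (1 ≤ q.1 ∧ q.1 ≤ q.2 ∧ q.2 ≤ (S.toList.length : Int))
instance (S : String) (Q : Int) (queries : List (Int × Int)) : Decidable (Pre_solve S Q queries) := by
  unfold Pre_solve; infer_instance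

def pvWitness_solve : String × Int × (List (Int × Int)) := ("ab", 2, [(1, 1), (1, 2)])

def Spec_solve (S : String) (Q : Int) (queries : List (Int × Int)) (out : Int) : Prop := out = solve_alt S Q queries
instance (S : String) (Q : Int) (queries : List (Int × Int)) (out : Int) : Decidable (Spec_solve S Q queries out) := by unfold Spec_solve; infer_instance

-- ===== CLAIM (what is proved, stated in full; the proofs are below) =====
def Claim_equal_solve : Prop := ∀ (S : String) (Q : Int) (queries : List (Int × Int)), Dom_solve S Q queries → Pre_solve S Q queries → Spec_solve S Q queries (solve S Q queries)

-- ===== LEMMAS AND PROOFS =====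

-- effective 26-slot index Python's wraparound assigns to character c (for 'G' ≤ c ≤ 'z')
def pvE (c : Char) : Nat := if c.toNat < 97 then c.toNat - 71 else c.toNat - 97

def pvCnt (cs : List Char) (j : Nat) : Int := (cs.countP (fun c => pvE c == j) : Int)

def pvTab (cs : List Char) : List Int := (List.range 26).map (fun j => pvCnt cs j)

-- the list of prefix tables A's first loop builds
def pvChain (t : List Int) (cs : List Char) : List (List Int) :=
  match cs with
  | [] => [t]
  | c :: cs => t :: pvChain (pvIncrA t ((c.toNat : Int) - 97)) cs

theorem pvTab_nil : pvTab [] = List.replicate 26 (0 : Int) := by decide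
theorem pvTab_length (cs : List Char) : (pvTab cs).length = 26 := by simp [pvTab]
theorem pvTab_getD (cs : List Char) (j : Nat) (h : j < 26) :
    (pvTab cs).getD j 0 = pvCnt cs j := by
  simp [pvTab, List.getD_eq_getElem?_getD, h]
theorem pvIncr_tab (cs : List Char) (c : Char) (h1 : 71 ≤ c.toNat) (h2 : c.toNat ≤ 122) :
    pvIncrA (pvTab cs) ((c.toNat : Int) - 97) = pvTab (cs ++ [c]) := by
  have he : pvE c < 26 := by unfold pvE; split <;> omega
  have hset : pvIncrA (pvTab cs) ((c.toNat : Int) - 97)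
      = (pvTab cs).set (pvE c) (pvCnt cs (pvE c) + 1) := by
    by_cases hc : c.toNat < 97
    · have hk : ((c.toNat : Int) - 97) = -((97 - c.toNat : Nat) : Int) := by omega
      have hkpos : 0 < 97 - c.toNat := by omega
      have hklen : 97 - c.toNat ≤ (pvTab cs).length := by rw [pvTab_length]; omega
      have hE : pvE c = (pvTab cs).length - (97 - c.toNat) := by
        rw [pvTab_length]; unfold pvE; rw [if_pos hc]; omega
      rw [pvIncrA, hk, PySem.List.pyGetD_neg_natCast _ _ _ hkpos hklen]
      rw [PySem.List.pySetD, PySem.List.pySet?, PySem.List.pyIdx?]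
      rw [if_neg (by omega), if_pos (by exact_mod_cast Int.neg_le_neg (by exact_mod_cast hklen))]
      simp only [Option.map_some, Option.getD_some]
      rw [hE]
      have h26 := pvTab_length cs
      have hidx : ((-(-((97 - c.toNat : Nat) : Int))).toNat) = 97 - c.toNat := by omega
      rw [hidx]
      congr 1
      rw [← List.getD_eq_getElem _ 0, pvTab_getD _ _ (by omega)]
    · have hk : ((c.toNat : Int) - 97) = ((c.toNat - 97 : Nat) : Int) := by omega
      have hE : pvE c = c.toNat - 97 := by unfold pvE; rw [if_neg hc]
      rw [pvIncrA, hk, PySem.List.pySetD_natCast, PySem.List.pyGetD_natCast]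
      rw [hE, pvTab_getD _ _ (by omega)]
  rw [hset]
  apply List.ext_getElem
  · simp [pvTab]
  · intro j hj hj2
    have hj26 : j < 26 := by simpa [pvTab] using hj2
    rw [List.getElem_set]
    simp only [pvTab, List.getElem_map, List.getElem_range]
    by_cases hje : j = pvE c
    · subst hje
      rw [if_pos rfl]
      simp [pvCnt, List.countP_append]
    · rw [if_neg (by omega)]
      simp only [pvCnt, List.countP_append]
      have hone : List.countP (fun c' => pvE c' == j) [c] = 0 := by
        simp [List.countP_singleton, beq_iff_eq]
        omega
      omega

theorem pvFold_eq_chain (cs : List Char) (acc : List (List Int)) (t : List Int) :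
    List.foldl (fun pref c =>
      pref ++ [pvIncrA (PySem.List.pyGetD pref (-1) []) ((c.toNat : Int) - 97)]) (acc ++ [t]) cs
    = acc ++ pvChain t cs := by
  induction cs generalizing acc t with
  | nil => simp [pvChain]
  | cons c cs ih =>
    rw [List.foldl_cons, PySem.List.pyGetD_neg_one_append_singleton]
    rw [ih (acc ++ [t])]
    simp [pvChain]

theorem pvChain_getD (cs : List Char) (pre : List Char) (i : Nat)
    (hdom : ∀ c ∈ cs, 71 ≤ c.toNat ∧ c.toNat ≤ 122) (hi : i ≤ cs.length) :
    (pvChain (pvTab pre) cs).getD i [] = pvTab (pre ++ cs.take i) := by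
  induction cs generalizing pre i with
  | nil =>
    have : i = 0 := by simpa using hi
    subst this
    simp [pvChain]
  | cons c cs ih =>
    match i with
    | 0 => simp [pvChain]
    | i + 1 =>
      have hd := hdom c (by simp)
      rw [pvChain]
      show (pvChain (pvIncrA (pvTab pre) ((c.toNat : Int) - 97)) cs).getD i []
          = pvTab (pre ++ List.take (i+1) (c :: cs))
      rw [pvIncr_tab pre c hd.1 hd.2]
      rw [ih (pre ++ [c]) i (fun c' hc' => hdom c' (by simp [hc'])) (by simpa using hi)]
      simp

theorem pvFreq_eq_tab_aux (cs : List Char) (hdom : ∀ c ∈ cs, 71 ≤ c.toNat ∧ c.toNat ≤ 122)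
    (a k : Nat) (hb : a + k ≤ cs.length) :
    pvFreq cs (a : Int) ((a : Int) + (k : Int)) = pvTab ((cs.drop a).take k) := by
  induction k with
  | zero =>
    rw [pvFreq, PySem.List.pyRange_one_eq_nil (by omega)]
    simp [pvTab_nil]
  | succ k ih =>
    have hak : a + k < cs.length := by omega
    rw [pvFreq, show ((a : Int) + ((k : Nat) + 1 : Nat)) = ((a : Int) + (k : Nat)) + 1 by push_cast; ring,
        PySem.List.pyRange_one_succ_right (by omega), List.foldl_append]
    rw [show List.foldl (fun f i =>
            PySem.List.pySetD f (((PySem.List.pyGetD cs i ' ').toNat : Int) - 97)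
              (PySem.List.pyGetD f (((PySem.List.pyGetD cs i ' ').toNat : Int) - 97) 0 + 1))
          (List.replicate 26 (0:Int)) (PySem.List.pyRange (a:Int) ((a:Int)+(k:Nat)) 1)
        = pvFreq cs (a : Int) ((a:Int)+(k:Nat)) from rfl]
    rw [ih (by omega)]
    rw [List.foldl_cons, List.foldl_nil]
    rw [show ((a : Int) + (k : Nat)) = (((a + k : Nat)) : Int) by push_cast; ring]
    rw [PySem.List.pyGetD_natCast, List.getD_eq_getElem _ _ hak]
    have hd := hdom (cs[a+k]) (by exact List.getElem_mem hak)
    have hstep := pvIncr_tab ((cs.drop a).take k) (cs[a+k]) hd.1 hd.2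
    unfold pvIncrA at hstep
    rw [hstep]
    congr 1
    rw [List.take_add_one]
    congr 1
    rw [List.getElem?_drop]
    rw [List.getElem?_eq_getElem hak]
    rfl

theorem pvFreq_eq_tab (cs : List Char) (hdom : ∀ c ∈ cs, 71 ≤ c.toNat ∧ c.toNat ≤ 122)
    (a b : Nat) (hab : a ≤ b) (hb : b ≤ cs.length) :
    pvFreq cs (a : Int) (b : Int) = pvTab ((cs.drop a).take (b - a)) := by
  have := pvFreq_eq_tab_aux cs hdom a (b - a) (by omega)
  rw [show ((a : Int) + ((b - a : Nat) : Int)) = (b : Int) by omega] at this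
  exact this

theorem pvCnt_slice (cs : List Char) (a b : Nat) (hab : a ≤ b) (j : Nat) :
    pvCnt ((cs.drop a).take (b - a)) j = pvCnt (cs.take b) j - pvCnt (cs.take a) j := by
  have : cs.take b = cs.take a ++ (cs.drop a).take (b - a) := by
    rw [← List.take_add]
    congr 1
    omega
  rw [this]
  simp [pvCnt, List.countP_append]


theorem pvCount_eq (cs : List Char) (hdom : ∀ c ∈ cs, 71 ≤ c.toNat ∧ c.toNat ≤ 122)
    (x y z : Nat) (hxy : x ≤ y) (hyz : y ≤ z) (hz : z ≤ cs.length) :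
    (PySem.List.pyRange 0 26 1).foldl (fun (s : Int) c =>
        if PySem.List.pyGetD (pvTab (cs.take y)) c 0 - PySem.List.pyGetD (pvTab (cs.take x)) c 0
           ≠ PySem.List.pyGetD (pvTab (cs.take z)) c 0 - PySem.List.pyGetD (pvTab (cs.take y)) c 0
        then s + 1 else s) 0
    = pvDiffCount (pvFreq cs (x : Int) (y : Int)) (pvFreq cs (y : Int) (z : Int)) := by
  -- LHS
  rw [show (PySem.List.pyRange 0 26 1) = (PySem.List.pyRange 0 ((26:Nat):Int) 1) by norm_num,
      PySem.List.pyRange_zero_nat, List.foldl_map]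
  rw [PySem.List.foldl_congr_mem' (List.range 26) _
      (fun (s : Int) (j : Nat) =>
        if (fun (j : Nat) => decide
            (pvCnt (cs.take y) j - pvCnt (cs.take x) j ≠ pvCnt (cs.take z) j - pvCnt (cs.take y) j)) j = true
        then s + 1 else s) 0 ?side]
  case side =>
    intro j hj s
    have hj26 : j < 26 := List.mem_range.mp hj
    rw [PySem.List.pyGetD_natCast, PySem.List.pyGetD_natCast, PySem.List.pyGetD_natCast,
        pvTab_getD _ _ hj26, pvTab_getD _ _ hj26, pvTab_getD _ _ hj26]
    simp only [decide_eq_true_eq]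
  rw [PySem.List.foldl_count_if]
  -- RHS
  rw [pvFreq_eq_tab cs hdom x y hxy (by omega), pvFreq_eq_tab cs hdom y z hyz hz]
  rw [pvDiffCount]
  unfold pvTab
  rw [List.zip_map', List.map_map]
  rw [List.map_congr_left (l := List.range 26)
      (f := _)
      (g := fun (j : Nat) =>
        if (fun (j : Nat) => decide
            (pvCnt (cs.take y) j - pvCnt (cs.take x) j ≠ pvCnt (cs.take z) j - pvCnt (cs.take y) j)) j = true
        then (1 : Int) else 0) ?side2]
  case side2 =>
    intro j hj
    simp only [decide_eq_true_eq, pvCnt_slice cs x y hxy, pvCnt_slice cs y z hyz,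
      Function.comp_apply]
  rw [PySem.List.sum_map_ite_one_zero]
  omega

theorem pvChain_getD_nil (cs : List Char) (i : Nat)
    (hdom : ∀ c ∈ cs, 71 ≤ c.toNat ∧ c.toNat ≤ 122) (hi : i ≤ cs.length) :
    (pvChain (pvTab []) cs).getD i [] = pvTab (cs.take i) := by
  simpa using pvChain_getD cs [] i hdom hi

theorem pvQuery_eq (cs : List Char) (hdom : ∀ c ∈ cs, 71 ≤ c.toNat ∧ c.toNat ≤ 122)
    (l r : Int)
    (hq : PySem.Int.mod (r - l + 1) 2 = 0 ∨ (1 ≤ l ∧ l ≤ r ∧ r ≤ (cs.length : Int)))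
    (res : Int) :
    (if pvIsOkA (pvChain (pvTab []) cs) l r then res + 1 else res)
    = (if PySem.Int.mod (r - l + 1) 2 == 0 then res
       else
         let l0 := l - 1
         let r0 := r - 1
         let m := PySem.Int.floordiv (l0 + r0) 2
         let cl := pvDiffCount (pvFreq cs l0 (m + 1)) (pvFreq cs (m + 1) (r0 + 1))
         let cr := pvDiffCount (pvFreq cs l0 m) (pvFreq cs m (r0 + 1))
         if cl == 1 || cr == 1 then res + 1 else res) := by
  by_cases hmod : PySem.Int.mod (r - l + 1) 2 = 0
  · have hb : (PySem.Int.mod (r - l + 1) 2 == 0) = true := by simpa using hmod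
    have hA : pvIsOkA (pvChain (pvTab []) cs) l r = false := by
      unfold pvIsOkA; rw [if_pos hb]
    rw [hA, if_pos hb]
    simp
  · have hbf : ¬((PySem.Int.mod (r - l + 1) 2 == 0) = true) := by simpa using hmod
    obtain h | ⟨hl1, hlr, hrn⟩ := hq
    · exact absurd h hmod
    set L : Nat := (l - 1).toNat with hLdef
    set R : Nat := (r - 1).toNat with hRdef
    have hl : l - 1 = (L : Int) := by omega
    have hr : r - 1 = (R : Int) := by omega
    have hLR : L ≤ R := by omega
    have hRn : R < cs.length := by omega
    have hm : PySem.Int.floordiv ((l - 1) + (r - 1)) 2 = (((L + R) / 2 : Nat) : Int) := by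
      rw [hl, hr, show (L : Int) + (R : Int) = ((L + R : Nat) : Int) by push_cast; ring,
          show (2 : Int) = ((2 : Nat) : Int) by norm_num, PySem.Int.floordiv_natCast]
    set M : Nat := (L + R) / 2 with hMdef
    have hLM : L ≤ M := by omega
    have hMR : M ≤ R := by omega
    have hA : pvIsOkA (pvChain (pvTab []) cs) l r
        = (pvDiffCount (pvFreq cs (L : Int) ((M + 1 : Nat) : Int)) (pvFreq cs ((M + 1 : Nat) : Int) ((R + 1 : Nat) : Int)) == 1
           || pvDiffCount (pvFreq cs (L : Int) ((M : Nat) : Int)) (pvFreq cs ((M : Nat) : Int) ((R + 1 : Nat) : Int)) == 1) := by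
      unfold pvIsOkA
      rw [if_neg hbf]
      simp only []
      rw [hm, hl, hr]
      rw [show ((M : Int) + 1) = ((M + 1 : Nat) : Int) by push_cast; ring,
          show ((R : Int) + 1) = ((R + 1 : Nat) : Int) by push_cast; ring]
      rw [PySem.List.pyGetD_natCast, PySem.List.pyGetD_natCast, PySem.List.pyGetD_natCast,
          PySem.List.pyGetD_natCast]
      rw [pvChain_getD_nil cs (M + 1) hdom (by omega),
          pvChain_getD_nil cs L hdom (by omega),
          pvChain_getD_nil cs (R + 1) hdom (by omega),
          pvChain_getD_nil cs M hdom (by omega)]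
      rw [show (fun (p : Int × Int) (c : Int) =>
            ((if PySem.List.pyGetD (pvTab (cs.take (M + 1))) c 0 - PySem.List.pyGetD (pvTab (cs.take L)) c 0 ≠ PySem.List.pyGetD (pvTab (cs.take (R + 1))) c 0 - PySem.List.pyGetD (pvTab (cs.take (M + 1))) c 0 then p.1 + 1 else p.1),
             (if PySem.List.pyGetD (pvTab (cs.take M)) c 0 - PySem.List.pyGetD (pvTab (cs.take L)) c 0 ≠ PySem.List.pyGetD (pvTab (cs.take (R + 1))) c 0 - PySem.List.pyGetD (pvTab (cs.take M)) c 0 then p.2 + 1 else p.2)))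
          = (fun (p : Int × Int) (c : Int) =>
            ((fun (s : Int) (c : Int) => if PySem.List.pyGetD (pvTab (cs.take (M + 1))) c 0 - PySem.List.pyGetD (pvTab (cs.take L)) c 0 ≠ PySem.List.pyGetD (pvTab (cs.take (R + 1))) c 0 - PySem.List.pyGetD (pvTab (cs.take (M + 1))) c 0 then s + 1 else s) p.1 c,
             (fun (s : Int) (c : Int) => if PySem.List.pyGetD (pvTab (cs.take M)) c 0 - PySem.List.pyGetD (pvTab (cs.take L)) c 0 ≠ PySem.List.pyGetD (pvTab (cs.take (R + 1))) c 0 - PySem.List.pyGetD (pvTab (cs.take M)) c 0 then s + 1 else s) p.2 c)) from rfl,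
          PySem.List.foldl_prod_mk
            (f := fun (s : Int) (c : Int) => if PySem.List.pyGetD (pvTab (cs.take (M + 1))) c 0 - PySem.List.pyGetD (pvTab (cs.take L)) c 0 ≠ PySem.List.pyGetD (pvTab (cs.take (R + 1))) c 0 - PySem.List.pyGetD (pvTab (cs.take (M + 1))) c 0 then s + 1 else s)
            (g := fun (s : Int) (c : Int) => if PySem.List.pyGetD (pvTab (cs.take M)) c 0 - PySem.List.pyGetD (pvTab (cs.take L)) c 0 ≠ PySem.List.pyGetD (pvTab (cs.take (R + 1))) c 0 - PySem.List.pyGetD (pvTab (cs.take M)) c 0 then s + 1 else s)]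
      rw [pvCount_eq cs hdom L (M + 1) (R + 1) (by omega) (by omega) (by omega),
          pvCount_eq cs hdom L M (R + 1) (by omega) (by omega) (by omega)]
    rw [hA, if_neg hbf]
    simp only []
    rw [hm, hl, hr]
    rw [show ((M : Int) + 1) = ((M + 1 : Nat) : Int) by push_cast; ring,
        show ((R : Int) + 1) = ((R + 1 : Nat) : Int) by push_cast; ring]

theorem pvFold_eq_chain_nil (cs : List Char) (t : List Int) :
    List.foldl (fun pref c =>
      pref ++ [pvIncrA (PySem.List.pyGetD pref (-1) []) ((c.toNat : Int) - 97)]) [t] cs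
    = pvChain t cs := by
  simpa using pvFold_eq_chain cs [] t

-- ===== VERDICT (by name: the statement is the Claim_ definition above) =====
theorem solve_spec : Claim_equal_solve := by
  intro S Q queries _hdom hpre
  obtain ⟨hS, hq⟩ := hpre
  have hS' : ∀ c ∈ S.toList, 71 ≤ c.toNat ∧ c.toNat ≤ 122 := by
    intro c hc
    have := List.all_eq_true.mp hS c hc
    simpa using this
  unfold Spec_solve solve solve_alt
  simp only []
  rw [show [List.replicate 26 (0 : Int)] = [pvTab []] by rw [pvTab_nil]]
  rw [pvFold_eq_chain_nil]
  exact PySem.List.foldl_congr_mem' queries _ _ 0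
    (fun q hqm res => pvQuery_eq S.toList hS' q.1 q.2 (hq q hqm) res)
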